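-- pv_equiv track=rewrite | github.com/m-shahrestani/JPEG-Compression | src/huffman.py | RLC
-- ===== SOURCE A (Python) =====
-- def RLC(list):
--     last_nonzero = -1
--     for i, s in enumerate(list):
--         if s != 0:
--             last_nonzero = i
--     symbols = []
--     run_length = 0
--     for i, s in enumerate(list):
--         if i > last_nonzero:
--             symbols.append((0, 0))
--             break
--         elif s == 0 and run_length < 15:
--             run_length += 1
--         else:
--             symbols.append((run_length, s))
--             run_length = 0
--     return symbols
-- ===== SOURCE B (Python) =====
-- def RLC(list):
--     symbols = []
--     run = 0
--     for s in list:
--         if s == 0: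
--             run += 1
--         else:
--             while run >= 16:
--                 symbols.append((15, 0))
--                 run -= 16
--             symbols.append((run, s))
--             run = 0
--     if run > 0:
--         symbols.append((0, 0))
--     return symbols
-- ===== Notes on version B (the rewrite author's own statement) =====
-- stated objective: simpler
-- what changed: Replaced A's separate last-nonzero prescan and break-based EOB with a single pass that keeps an uncapped zero-run counter, drains it into (15,0) ZRL symbols only when a nonzero coefficient arrives, and emits one (0,0) EOB iff a run is left after the loop.
import Mathlib
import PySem

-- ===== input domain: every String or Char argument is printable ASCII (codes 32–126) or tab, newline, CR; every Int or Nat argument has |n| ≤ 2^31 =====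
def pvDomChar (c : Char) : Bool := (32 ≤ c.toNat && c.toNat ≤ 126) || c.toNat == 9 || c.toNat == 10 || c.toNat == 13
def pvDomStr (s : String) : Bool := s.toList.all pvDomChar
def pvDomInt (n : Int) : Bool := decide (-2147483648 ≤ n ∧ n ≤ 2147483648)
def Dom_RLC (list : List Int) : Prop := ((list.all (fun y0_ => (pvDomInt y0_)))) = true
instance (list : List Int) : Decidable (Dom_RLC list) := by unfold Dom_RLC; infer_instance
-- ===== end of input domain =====

-- B is a simpler single-pass encoder (run counter drained at each nonzero; trailing run -> one EOB),
-- replacing A's separate last-nonzero scan and break-based EOB; same return value on every input.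

-- ===== PORT A =====
-- second loop of A: break is modelled by returning immediately with the appended EOB
def RLC_loop : List (Int × Int) → Int → Int → List (Int × Int) → List (Int × Int)
  | [], _, _, symbols => symbols
  | (i, s) :: rest, last_nonzero, run_length, symbols =>
    if i > last_nonzero then symbols ++ [(0, 0)]
    else if s = 0 ∧ run_length < 15 then RLC_loop rest last_nonzero (run_length + 1) symbols
    else RLC_loop rest last_nonzero 0 (symbols ++ [(run_length, s)])

def RLC (list : List Int) : List (Int × Int) :=
  let last_nonzero :=
    (PySem.List.enumerate list 0).foldl (fun acc p => if p.2 ≠ 0 then p.1 else acc) (-1)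
  RLC_loop (PySem.List.enumerate list 0) last_nonzero 0 []

-- ===== PORT B =====
-- the 'while run >= 16' inner loop of B
def RLC_drain (run : Int) (symbols : List (Int × Int)) : Int × List (Int × Int) :=
  if 16 ≤ run then RLC_drain (run - 16) (symbols ++ [(15, 0)]) else (run, symbols)
termination_by run.toNat
decreasing_by omega

def RLC_alt_loop : List Int → Int → List (Int × Int) → List (Int × Int)
  | [], run, symbols => if run > 0 then symbols ++ [(0, 0)] else symbols
  | s :: rest, run, symbols =>
    if s = 0 then RLC_alt_loop rest (run + 1) symbols
    else
      let rs := RLC_drain run symbols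
      RLC_alt_loop rest 0 (rs.2 ++ [(rs.1, s)])

def RLC_alt (list : List Int) : List (Int × Int) := RLC_alt_loop list 0 []

-- ===== PRECONDITION & SPEC =====
def Spec_RLC (list : List Int) (out : List (Int × Int)) : Prop := out = RLC_alt list
instance (list : List Int) (out : List (Int × Int)) : Decidable (Spec_RLC list out) := by unfold Spec_RLC; infer_instance

-- ===== CLAIM (what is proved, stated in full; the proofs are below) =====
def Claim_equal_RLC : Prop := ∀ (list : List Int), Dom_RLC list → Spec_RLC list (RLC list)

-- ===== LEMMAS AND PROOFS =====

-- the maximal all-zero suffix of l, and the prefix before it (ends in a nonzero element or is empty)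
def trailZ (l : List Int) : List Int := (l.reverse.takeWhile (· == 0)).reverse
def headP (l : List Int) : List Int := (l.reverse.dropWhile (· == 0)).reverse

theorem headP_append_trailZ (l : List Int) : headP l ++ trailZ l = l := by
  unfold headP trailZ
  rw [← List.reverse_append, List.takeWhile_append_dropWhile, List.reverse_reverse]

theorem trailZ_zero {l : List Int} {x : Int} (hx : x ∈ trailZ l) : x = 0 := by
  unfold trailZ at hx
  rw [List.mem_reverse] at hx
  have := List.mem_takeWhile_imp hx
  simpa using this

theorem headP_last {l : List Int} (h : headP l ≠ []) : (headP l).getLast h ≠ 0 := by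
  unfold headP at h ⊢
  rw [List.getLast_reverse]
  have := List.head_dropWhile_not (p := fun x : Int => x == 0) (l := l.reverse)
    (by simpa [headP] using h)
  simpa using this

theorem lnz_eq (l : List Int) :
    (PySem.List.enumerate l 0).foldl (fun acc p => if p.2 ≠ 0 then p.1 else acc) (-1)
      = ((headP l).length : Int) - 1 := by
  induction l using List.reverseRecOn with
  | nil => simp [PySem.List.enumerate_nil, headP]
  | append_singleton l x ih =>
    rw [PySem.List.enumerate_append, List.foldl_append,
      PySem.List.enumerate_cons, PySem.List.enumerate_nil]
    by_cases hx : x = 0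
    · subst hx
      have hh : headP (l ++ [(0 : Int)]) = headP l := by
        simp [headP]
      simpa [hh] using ih
    · have hh : headP (l ++ [x]) = l ++ [x] := by
        simp [headP, hx]
      simp [hx, hh]

theorem drain_eq (n : Nat) : ∀ (run : Int) (syms : List (Int × Int)), run.toNat ≤ n → 0 ≤ run →
    RLC_drain run syms = (run % 16, syms ++ List.replicate ((run / 16).toNat) (15, 0)) := by
  induction n with
  | zero =>
    intro run syms hn h0
    have hr : run = 0 := by omega
    subst hr
    rw [RLC_drain]
    norm_num
  | succ n ih =>
    intro run syms hn h0
    rw [RLC_drain]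
    by_cases h16 : 16 ≤ run
    · rw [if_pos h16, ih (run - 16) (syms ++ [(15, 0)]) (by omega) (by omega)]
      have h1 : (run - 16) % 16 = run % 16 := by omega
      have h2 : ((run - 16) / 16).toNat + 1 = (run / 16).toNat := by omega
      rw [h1, List.append_assoc, ← h2, List.singleton_append, ← List.replicate_succ]
    · rw [if_neg h16]
      have h1 : run % 16 = run := by omega
      have h2 : (run / 16).toNat = 0 := by omega
      rw [h1, h2, List.replicate_zero, List.append_nil]

theorem altloop_zeros (z : List Int) : ∀ (run : Int) (syms : List (Int × Int)),
    (∀ x ∈ z, x = 0) →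
    RLC_alt_loop z run syms = if 0 < run + z.length then syms ++ [(0, 0)] else syms := by
  induction z with
  | nil =>
    intro run syms _
    simp [RLC_alt_loop]
  | cons x xs ih =>
    intro run syms h
    have hx : x = 0 := h x List.mem_cons_self
    subst hx
    rw [show RLC_alt_loop (0 :: xs) run syms = RLC_alt_loop xs (run + 1) syms by
      simp [RLC_alt_loop]]
    rw [ih (run + 1) syms (fun y hy => h y (List.mem_cons_of_mem _ hy))]
    simp only [List.length_cons]
    push_cast
    split_ifs with h1 h2 <;> first | rfl | omega

theorem loop_eq (p : List Int) : ∀ (z : List Int) (i0 run : Int) (syms : List (Int × Int)) (lnz : Int),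
    (∀ x ∈ z, x = 0) → 0 ≤ run →
    (∀ h : p ≠ [], p.getLast h ≠ 0) → (p = [] → run = 0) →
    (∀ j : Nat, j < p.length → i0 + (j : Int) ≤ lnz) → (i0 + (p.length : Int) > lnz) →
    RLC_loop (PySem.List.enumerate (p ++ z) i0) lnz (run % 16)
        (syms ++ List.replicate ((run / 16).toNat) (15, 0))
      = RLC_alt_loop (p ++ z) run syms := by
  induction p with
  | nil =>
    intro z i0 run syms lnz hz hr hlast hemp H1 H2
    have hr0 : run = 0 := hemp rfl
    subst hr0
    norm_num
    cases z with
    | nil => simp [PySem.List.enumerate_nil, RLC_loop, RLC_alt_loop]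
    | cons w ws =>
      have hi : i0 > lnz := by simpa using H2
      rw [PySem.List.enumerate_cons]
      rw [altloop_zeros (w :: ws) 0 syms hz]
      simp [RLC_loop, hi]
  | cons x p' ih =>
    intro z i0 run syms lnz hz hr hlast hemp H1 H2
    have hi0 : ¬ i0 > lnz := by
      have := H1 0 (by simp)
      simpa using this
    rw [List.cons_append, PySem.List.enumerate_cons]
    by_cases hx : x = 0
    · subst hx
      have hp' : p' ≠ [] := by
        intro hp
        have := hlast (by simp)
        simp [hp] at this
      have hB : RLC_alt_loop (0 :: (p' ++ z)) run syms = RLC_alt_loop (p' ++ z) (run + 1) syms := by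
        simp [RLC_alt_loop]
      rw [hB]
      by_cases h15 : run % 16 < 15
      · have hc : RLC_loop ((i0, (0:Int)) :: PySem.List.enumerate (p' ++ z) (i0 + 1)) lnz (run % 16)
            (syms ++ List.replicate ((run / 16).toNat) (15, 0))
            = RLC_loop (PySem.List.enumerate (p' ++ z) (i0 + 1)) lnz (run % 16 + 1)
              (syms ++ List.replicate ((run / 16).toNat) (15, 0)) := by
          simp [RLC_loop, hi0, h15]
        rw [hc]
        have e1 : run % 16 + 1 = (run + 1) % 16 := by omega
        have e2 : (run / 16).toNat = ((run + 1) / 16).toNat := by omega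
        rw [e1, e2]
        exact ih z (i0 + 1) (run + 1) syms lnz hz (by omega)
          (fun h => by rw [← List.getLast_cons h]; exact hlast (by simp))
          (fun h => absurd h hp')
          (fun j hj => by
            have := H1 (j + 1) (by simp; omega)
            push_cast at this ⊢; omega)
          (by
            have := H2
            simp only [List.length_cons] at this
            push_cast at this ⊢; omega)
      · have h15' : run % 16 = 15 := by omega
        have hc : RLC_loop ((i0, (0:Int)) :: PySem.List.enumerate (p' ++ z) (i0 + 1)) lnz (run % 16)
            (syms ++ List.replicate ((run / 16).toNat) (15, 0))
            = RLC_loop (PySem.List.enumerate (p' ++ z) (i0 + 1)) lnz 0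
              ((syms ++ List.replicate ((run / 16).toNat) (15, 0)) ++ [(15, 0)]) := by
          simp [RLC_loop, hi0, h15']
        rw [hc]
        have e1 : (0 : Int) = (run + 1) % 16 := by omega
        have e2 : ((run + 1) / 16).toNat = (run / 16).toNat + 1 := by omega
        rw [List.append_assoc, ← List.replicate_succ' (n := (run / 16).toNat), ← e2]
        have key := ih z (i0 + 1) (run + 1) syms lnz hz (by omega)
          (fun h => by rw [← List.getLast_cons h]; exact hlast (by simp))
          (fun h => absurd h hp')
          (fun j hj => by
            have := H1 (j + 1) (by simp; omega)
            push_cast at this ⊢; omega)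
          (by
            have := H2
            simp only [List.length_cons] at this
            push_cast at this ⊢; omega)
        rw [← e1] at key
        exact key
    · have hB : RLC_alt_loop (x :: (p' ++ z)) run syms
          = RLC_alt_loop (p' ++ z) 0 ((RLC_drain run syms).2 ++ [((RLC_drain run syms).1, x)]) := by
        simp [RLC_alt_loop, hx]
      rw [hB, drain_eq run.toNat run syms le_rfl hr]
      have hc : RLC_loop ((i0, x) :: PySem.List.enumerate (p' ++ z) (i0 + 1)) lnz (run % 16)
          (syms ++ List.replicate ((run / 16).toNat) (15, 0))
          = RLC_loop (PySem.List.enumerate (p' ++ z) (i0 + 1)) lnz 0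
            ((syms ++ List.replicate ((run / 16).toNat) (15, 0)) ++ [(run % 16, x)]) := by
        simp [RLC_loop, hi0, hx]
      rw [hc]
      have := ih z (i0 + 1) 0 ((syms ++ List.replicate ((run / 16).toNat) (15, 0)) ++ [(run % 16, x)]) lnz hz le_rfl
        (fun h => by rw [← List.getLast_cons h]; exact hlast (by simp))
        (fun _ => rfl)
        (fun j hj => by
          have := H1 (j + 1) (by simp; omega)
          push_cast at this ⊢; omega)
        (by
          have := H2
          simp only [List.length_cons] at this
          push_cast at this ⊢; omega)
      simpa using this

-- ===== VERDICT (by name: the statement is the Claim_ definition above) =====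
theorem RLC_spec : Claim_equal_RLC := by
  intro l _
  unfold Spec_RLC RLC RLC_alt
  rw [lnz_eq]
  have key := loop_eq (headP l) (trailZ l) 0 0 [] (((headP l).length : Int) - 1)
    (fun x hx => trailZ_zero hx) le_rfl (fun h => headP_last h) (fun _ => rfl)
    (by intro j hj; omega) (by omega)
  rw [headP_append_trailZ] at key
  simpa using key
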